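-- pv_equiv track=rewrite | github.com/Earthson/afewords_base | afewords/aflib/article/translator/translator.py | list_trans
-- ===== SOURCE A (Python) =====
-- def has_prefix(tomatch, pre):
--     '''judge tomatch wheather have prefix pre'''
--     slen = len(pre)
--     if tomatch[0:slen] == pre[0:slen]:
--         return True
--     return False
--
-- def list_trans(lines, curline, flag, prefix = ''):
--     '''sub function for translation for <ul> <ol> <li>'''
--     lcnt = len(lines)
--     mlen = len(prefix)
--     res, end = None, None
--     if flag == '*':
--         #res, end = '<ul>', '</ul>'
--         res, end = '', ''
--     else:
--         #res, end = '<ol>', '</ol>'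
--         res, end = '', ''
--     while curline < lcnt:
--         if has_prefix(lines[curline], prefix + '*'):
--             ss, curline = list_trans(lines, curline, '*', prefix + '*')
--             res += ss
--         elif has_prefix(lines[curline], prefix + '#'):
--             ss, curline = list_trans(lines, curline, '#', prefix + '#')
--             res += ss
--         elif has_prefix(lines[curline], prefix):
--             tmp = prefix[-1]
--             if tmp == '#':
--                 tmp = '1.  '
--             else:
--                 tmp = '*   '
--             tmp = ''.join(['    ' for each in prefix[:-1]]) + tmp
--             res += tmp + lines[curline][mlen:] + '\n'#+ '</li>'
--             #res += '<li>' + lines[curline][mlen:] + '</li>\n'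
--             curline += 1
--         else:
--             res += end
--             return (res, curline)
--     res += end
--     return (res, curline)
-- ===== SOURCE B (Python) =====
-- def list_trans(lines, curline, flag, prefix = ''):
--     '''sub function for translation for <ul> <ol> <li>'''
--     lcnt = len(lines)
--     mlen = len(prefix)
--     out = []
--     while curline < lcnt:
--         line = lines[curline]
--         if line[0:mlen] != prefix:
--             break
--         j = mlen
--         while j < len(line) and line[j] in '*#':
--             j += 1
--         full = line[:j]
--         last = full[-1]
--         bullet = '1.  ' if last == '#' else '*   '
--         out.append('    ' * (j - 1) + bullet + line[j:] + '\n')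
--         curline += 1
--     return (''.join(out), curline)
-- ===== Notes on version B (the rewrite author's own statement) =====
-- stated objective: simpler
-- what changed: Replaced A's mutual nesting recursion (one recursive call per extra '*'/'#' of list depth, re-dispatching on the same line at every level) by a single flat while-loop over the lines that scans each line's own leading '*'/'#' marker run directly to build its indent and bullet.
import Mathlib
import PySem

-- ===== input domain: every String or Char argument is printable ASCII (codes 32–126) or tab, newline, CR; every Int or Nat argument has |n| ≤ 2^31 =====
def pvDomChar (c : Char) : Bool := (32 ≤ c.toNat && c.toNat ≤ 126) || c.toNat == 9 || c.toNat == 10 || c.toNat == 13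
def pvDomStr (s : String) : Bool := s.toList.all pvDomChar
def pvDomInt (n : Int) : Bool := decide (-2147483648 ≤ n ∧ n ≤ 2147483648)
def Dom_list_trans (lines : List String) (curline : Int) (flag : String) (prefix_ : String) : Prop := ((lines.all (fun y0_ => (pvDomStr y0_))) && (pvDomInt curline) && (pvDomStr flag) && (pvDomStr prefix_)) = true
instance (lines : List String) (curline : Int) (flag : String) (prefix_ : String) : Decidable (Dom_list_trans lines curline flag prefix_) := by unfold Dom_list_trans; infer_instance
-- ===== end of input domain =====

-- B replaces A's mutual nesting recursion (one recursive call per extra '*'/'#' of list depth)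
-- by a single flat loop over the lines: each line's output depends only on its own leading marker
-- run, so B scans that run directly (objective: simpler).

-- ===== PORT A =====

-- Python: has_prefix(tomatch, pre)
-- Python: has_prefix(tomatch, pre); slen = len(pre)
def hasPrefixSlice (tomatch pre : String) : Bool :=
  if PySem.Str.slice tomatch (some 0) (some (PySem.Str.len pre))
      = PySem.Str.slice pre (some 0) (some (PySem.Str.len pre)) then true
  else false

-- helpers used only by the termination argument of `listTransLoop` (cited in decreasing_by)
def pvMaxLen (lines : List String) : Nat := lines.foldl (fun acc s => max acc s.toList.length) 0

theorem pvLine_le_maxLen (lines : List String) (c : Int) :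
    ((PySem.List.pyGet? lines c).getD "").toList.length ≤ pvMaxLen lines := by
  cases h : PySem.List.pyGet? lines c with
  | none => simp
  | some s =>
    simpa using (PySem.List.le_foldl_max_nat lines (fun s => s.toList.length) 0).2 s
      (PySem.List.mem_of_pyGet?_eq_some lines h)

theorem pvHasPrefix_len (t q : String) (h : hasPrefixSlice t q = true) :
    q.toList.length ≤ t.toList.length := by
  unfold hasPrefixSlice at h
  split_ifs at h with hc
  have := congrArg String.toList hc
  simp only [PySem.Str.toList_slice, PySem.Chars.slice_eq_listSlice, PySem.Str.len_eq,
    PySem.List.slice_zero_start, PySem.List.slice_to_natCast, String.length_toList] at this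
  have hl := congrArg List.length this
  simp only [List.length_take, String.length_toList] at hl
  simp only [String.length_toList]
  omega

-- arithmetic helpers cited by the termination proofs (kept as named lemmas so the
-- definitions do not embed large proof terms)
theorem pv_toNat_succ_lt {n c : Int} (h : c < n) : (n - (c + 1)).toNat < (n - c).toNat := by omega

theorem pv_meas_cont {n c c' : Int} (h : c < n) (hc : c < c') : (n - c').toNat < (n - c).toNat := by omega

theorem pv_meas_deeper (M lp ll : Nat) (h1 : lp + 1 <= ll) (h2 : ll <= M) :
    M + 1 - (lp + 1) < M + 1 - lp := by omega

theorem pv_meas_step (n c : Int) (M s s' : Nat) (h : c < n) (hs' : s' <= M + 1) :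
    (n - (c + 1)).toNat * (M + 2) + s' < (n - c).toNat * (M + 2) + s := by
  have hstep : (n - c).toNat = (n - (c + 1)).toNat + 1 := by omega
  rw [hstep, Nat.succ_mul]
  omega

theorem pv_dec_star (lines : List String) (p : String) (c : Int)
    (h1 : hasPrefixSlice ((PySem.List.pyGet? lines c).getD "") (p ++ "*") = true) :
    ((lines.length : Int) - c).toNat * (pvMaxLen lines + 2) + (pvMaxLen lines + 1 - (p ++ "*").toList.length)
      < ((lines.length : Int) - c).toNat * (pvMaxLen lines + 2) + (pvMaxLen lines + 1 - p.toList.length) := by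
  have hq := pvHasPrefix_len _ _ h1
  have hline := pvLine_le_maxLen lines c
  have hl : (p ++ "*").toList.length = p.toList.length + 1 := by simp
  apply Nat.add_lt_add_left
  rw [hl]
  have hq2 : p.toList.length + 1 ≤ ((PySem.List.pyGet? lines c).getD "").toList.length := by
    simpa using hq
  exact pv_meas_deeper (pvMaxLen lines) p.toList.length _ hq2 hline

theorem pv_dec_hash (lines : List String) (p : String) (c : Int)
    (h2 : hasPrefixSlice ((PySem.List.pyGet? lines c).getD "") (p ++ "#") = true) :
    ((lines.length : Int) - c).toNat * (pvMaxLen lines + 2) + (pvMaxLen lines + 1 - (p ++ "#").toList.length)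
      < ((lines.length : Int) - c).toNat * (pvMaxLen lines + 2) + (pvMaxLen lines + 1 - p.toList.length) := by
  have hq := pvHasPrefix_len _ _ h2
  have hline := pvLine_le_maxLen lines c
  have hl : (p ++ "#").toList.length = p.toList.length + 1 := by simp
  apply Nat.add_lt_add_left
  rw [hl]
  have hq2 : p.toList.length + 1 ≤ ((PySem.List.pyGet? lines c).getD "").toList.length := by
    simpa using hq
  exact pv_meas_deeper (pvMaxLen lines) p.toList.length _ hq2 hline

theorem pv_dec_cont (lines : List String) (p : String) {c c' : Int}
    (h : c < (lines.length : Int)) (hc : c < c') :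
    ((lines.length : Int) - c').toNat * (pvMaxLen lines + 2) + (pvMaxLen lines + 1 - p.toList.length)
      < ((lines.length : Int) - c).toNat * (pvMaxLen lines + 2) + (pvMaxLen lines + 1 - p.toList.length) :=
  Nat.add_lt_add_right ((Nat.mul_lt_mul_right (Nat.succ_pos _)).mpr (pv_meas_cont h hc)) _

theorem pv_dec_emit (lines : List String) (p : String) (c : Int) (h : c < (lines.length : Int)) :
    ((lines.length : Int) - (c + 1)).toNat * (pvMaxLen lines + 2) + (pvMaxLen lines + 1 - p.toList.length)
      < ((lines.length : Int) - c).toNat * (pvMaxLen lines + 2) + (pvMaxLen lines + 1 - p.toList.length) :=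
  pv_meas_step _ _ _ _ _ h (Nat.sub_le _ _)

-- the Python while-loop of list_trans, one recursive step per iteration; the nested
-- list_trans(lines, curline, '*', prefix+'*') calls are the first two branches.
-- The subtype carries the fact (needed for termination) that the loop never moves curline
-- backwards, and moves it strictly forward whenever the current line matches the prefix.
def listTransLoop (lines : List String) (flag : String) (prefix_ : String) (curline : Int) :
    {r : String × Int // curline ≤ r.2 ∧
      ((curline < (lines.length : Int) ∧
        hasPrefixSlice ((PySem.List.pyGet? lines curline).getD "") prefix_ = true) → curline < r.2)} :=
  if h : curline < (lines.length : Int) then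
    if h1 : hasPrefixSlice ((PySem.List.pyGet? lines curline).getD "") (prefix_ ++ "*") = true then
      let r1 := listTransLoop lines "*" (prefix_ ++ "*") curline
      let r2 := listTransLoop lines flag prefix_ r1.1.2
      ⟨(r1.1.1 ++ r2.1.1, r2.1.2), by
        have ha := r1.2.2 ⟨h, h1⟩
        have hb := r2.2.1
        exact ⟨ha.le.trans hb, fun _ => lt_of_lt_of_le ha hb⟩⟩
    else if h2 : hasPrefixSlice ((PySem.List.pyGet? lines curline).getD "") (prefix_ ++ "#") = true then
      let r1 := listTransLoop lines "#" (prefix_ ++ "#") curline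
      let r2 := listTransLoop lines flag prefix_ r1.1.2
      ⟨(r1.1.1 ++ r2.1.1, r2.1.2), by
        have ha := r1.2.2 ⟨h, h2⟩
        have hb := r2.2.1
        exact ⟨ha.le.trans hb, fun _ => lt_of_lt_of_le ha hb⟩⟩
    else if h3 : hasPrefixSlice ((PySem.List.pyGet? lines curline).getD "") prefix_ = true then
      -- Python: tmp = prefix[-1] — raises IndexError exactly when prefix == ''; Pre_ excludes
      -- those inputs, so the default ' ' below is never relevant inside Pre_.
      let tmp0 := (PySem.Str.pyGet? prefix_ (-1)).getD ' '
      let tmp1 := if tmp0 = '#' then "1.  " else "*   "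
      -- Python: ''.join(['    ' for each in prefix[:-1]]) + tmp
      let tmp := PySem.Str.join "" ((PySem.Str.slice prefix_ none (some (-1))).toList.map (fun _ => "    ")) ++ tmp1
      let r := listTransLoop lines flag prefix_ (curline + 1)
      ⟨(tmp ++ PySem.Str.slice ((PySem.List.pyGet? lines curline).getD "") (some (PySem.Str.len prefix_)) none ++ "\n" ++ r.1.1, r.1.2), by
        have hb := r.2.1
        exact ⟨((lt_add_one curline).le.trans hb), fun _ => lt_of_lt_of_le (lt_add_one curline) hb⟩⟩
    else ⟨("", curline), le_refl _, fun hc => absurd hc.2 h3⟩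
  else ⟨("", curline), le_refl _, fun hc => absurd hc.1 h⟩
termination_by ((lines.length : Int) - curline).toNat * (pvMaxLen lines + 2) + (pvMaxLen lines + 1 - prefix_.toList.length)
decreasing_by
  all_goals first
  | exact pv_dec_star lines prefix_ curline h1
  | exact pv_dec_hash lines prefix_ curline h2
  | exact pv_dec_cont lines prefix_ h (r1.2.2 ⟨h, h1⟩)
  | exact pv_dec_cont lines prefix_ h (r1.2.2 ⟨h, h2⟩)
  | exact pv_dec_emit lines prefix_ curline h

def list_trans (lines : List String) (curline : Int) (flag : String) (prefix_ : String) : String × Int :=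
  -- Python initializes (res, end) to ('', '') for either flag and appends end on return;
  -- the while-loop itself is ported as listTransLoop.
  let resEnd := if flag == "*" then (("" : String), ("" : String)) else ("", "")
  let r := (listTransLoop lines flag prefix_ curline).1
  (resEnd.1 ++ r.1 ++ resEnd.2, r.2)

-- ===== PORT B =====

-- Python B: while j < len(line) and line[j] in '*#': j += 1   (returns the final j)
def listTransAltScan (cs : List Char) (j : Nat) : Nat :=
  if h : j < cs.length then
    if cs[j] = '*' ∨ cs[j] = '#' then listTransAltScan cs (j + 1) else j
  else j
termination_by cs.length - j
decreasing_by exact Nat.sub_succ_lt_self _ _ h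

-- the body of one loop iteration of B after the j-scan:
-- full = line[:j]; last = full[-1]; bullet; '    '*(j-1) + bullet + line[j:] + '\n'
-- ('    ' * (j-1) is ported as a join of j-1 copies; last = full[-1] raises IndexError in
-- Python exactly when full == '' — outside Pre_ — so the default ' ' is never relevant inside Pre_)
def pvEntry (line : String) (j : Nat) : String :=
  let full := PySem.Str.slice line none (some (j : Int))
  let last := (PySem.Str.pyGet? full (-1)).getD ' '
  let bullet := if last = '#' then "1.  " else "*   "
  PySem.Str.join "" (List.replicate (j - 1) "    ") ++ bullet ++ PySem.Str.slice line (some (j : Int)) none ++ "\n"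

def listTransAltLoop (lines : List String) (prefix_ : String) (out : List String) (curline : Int) :
    List String × Int :=
  if h : curline < (lines.length : Int) then
    let line := (PySem.List.pyGet? lines curline).getD ""
    if PySem.Str.slice line (some 0) (some (PySem.Str.len prefix_)) ≠ prefix_ then (out, curline)
    else
      let j := listTransAltScan line.toList prefix_.toList.length
      listTransAltLoop lines prefix_ (out ++ [pvEntry line j]) (curline + 1)
  else (out, curline)
termination_by ((lines.length : Int) - curline).toNat
decreasing_by exact pv_toNat_succ_lt h

def list_trans_alt (lines : List String) (curline : Int) (flag : String) (prefix_ : String) : String × Int :=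
  let r := listTransAltLoop lines prefix_ [] curline
  (PySem.Str.join "" r.1, r.2)

-- ===== PRECONDITION & SPEC =====
-- Pre_ excludes exactly the inputs on which Python A raises: IndexError from lines[curline]
-- when curline < -len(lines), and IndexError at prefix[-1] when prefix == '' and some line
-- from curline on does not begin with '*' or '#'.
def Pre_list_trans (lines : List String) (curline : Int) (flag : String) (prefix_ : String) : Prop :=
  (lines.length : Int) ≤ curline ∨
    (-(lines.length : Int) ≤ curline ∧
      (prefix_ ≠ "" ∨
        ∀ s ∈ (if curline < 0 then lines else lines.drop curline.toNat),
          s.toList.head? = some '*' ∨ s.toList.head? = some '#'))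
instance (lines : List String) (curline : Int) (flag : String) (prefix_ : String) : Decidable (Pre_list_trans lines curline flag prefix_) := by unfold Pre_list_trans; infer_instance

def pvWitness_list_trans : List String × Int × String × String := (["* a", "** b", "# c"], 0, "*", "")

def Spec_list_trans (lines : List String) (curline : Int) (flag : String) (prefix_ : String) (out : String × Int) : Prop := out = list_trans_alt lines curline flag prefix_
instance (lines : List String) (curline : Int) (flag : String) (prefix_ : String) (out : String × Int) : Decidable (Spec_list_trans lines curline flag prefix_ out) := by unfold Spec_list_trans; infer_instance

-- ===== CLAIM (what is proved, stated in full; the proofs are below) =====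
def Claim_equal_list_trans : Prop := ∀ (lines : List String) (curline : Int) (flag : String) (prefix_ : String), Dom_list_trans lines curline flag prefix_ → Pre_list_trans lines curline flag prefix_ → Spec_list_trans lines curline flag prefix_ (list_trans lines curline flag prefix_)

-- ===== LEMMAS AND PROOFS =====

-- proof-side restatement of B: the flat loop producing the final string directly
def altSpec (lines : List String) (p : String) (c : Int) : String × Int :=
  if h : c < (lines.length : Int) then
    if PySem.Str.slice ((PySem.List.pyGet? lines c).getD "") (some 0) (some (PySem.Str.len p)) ≠ p then
      ("", c)
    else
      (pvEntry ((PySem.List.pyGet? lines c).getD "")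
          (listTransAltScan ((PySem.List.pyGet? lines c).getD "").toList p.toList.length)
        ++ (altSpec lines p (c + 1)).1,
       (altSpec lines p (c + 1)).2)
  else ("", c)
termination_by ((lines.length : Int) - c).toNat
decreasing_by exact pv_toNat_succ_lt h

theorem pv_flatten_intersperse (l : List (List Char)) :
    (List.intersperse ([] : List Char) l).flatten = l.flatten := by
  induction l with
  | nil => rfl
  | cons x xs ih =>
    cases xs with
    | nil => simp
    | cons y ys =>
      simp only [List.intersperse, List.flatten_cons] at *
      simp_all

theorem pv_join_snoc (parts : List String) (e : String) :
    PySem.Str.join "" (parts ++ [e]) = PySem.Str.join "" parts ++ e := by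
  rw [← String.toList_inj]
  simp [PySem.Str.toList_join, PySem.Chars.join, List.intercalate, pv_flatten_intersperse]

theorem pv_append_empty (s : String) : s ++ "" = s := by
  rw [← String.toList_inj]; simp

theorem pv_empty_append (s : String) : "" ++ s = s := by
  rw [← String.toList_inj]; simp

theorem pv_altSpec_stop (lines : List String) (p : String) (c : Int)
    (hge : ¬ c < (lines.length : Int)) : altSpec lines p c = ("", c) := by
  rw [altSpec, dif_neg hge]

theorem pv_altSpec_break (lines : List String) (p : String) (c : Int)
    (h : c < (lines.length : Int))
    (hne : PySem.Str.slice ((PySem.List.pyGet? lines c).getD "") (some 0) (some (PySem.Str.len p)) ≠ p) :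
    altSpec lines p c = ("", c) := by
  rw [altSpec, dif_pos h, if_pos hne]

theorem pv_altSpec_step (lines : List String) (p : String) (c : Int)
    (h : c < (lines.length : Int))
    (hcond : ¬ PySem.Str.slice ((PySem.List.pyGet? lines c).getD "") (some 0) (some (PySem.Str.len p)) ≠ p) :
    altSpec lines p c
      = (pvEntry ((PySem.List.pyGet? lines c).getD "")
            (listTransAltScan ((PySem.List.pyGet? lines c).getD "").toList p.toList.length)
          ++ (altSpec lines p (c + 1)).1,
         (altSpec lines p (c + 1)).2) := by
  rw [altSpec, dif_pos h, if_neg hcond]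

theorem pv_altLoop_spec (lines : List String) (p : String) :
    ∀ (out : List String) (c : Int),
      (PySem.Str.join "" (listTransAltLoop lines p out c).1, (listTransAltLoop lines p out c).2)
        = (PySem.Str.join "" out ++ (altSpec lines p c).1, (altSpec lines p c).2) := by
  intro out c
  fun_induction listTransAltLoop lines p out c with
  | case1 out c h line hne =>
      simp [pv_altSpec_break lines p c h hne]
  | case2 out c h line hne j ih =>
      rw [ih, pv_join_snoc, pv_altSpec_step lines p c h hne]
      refine Prod.ext ?_ rfl
      show PySem.Str.join "" out ++ pvEntry line j ++ _ = _
      rw [String.append_assoc]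
  | case3 out c h =>
      simp [pv_altSpec_stop lines p c h]

theorem pv_cond_iff (line p : String) :
    PySem.Str.slice line (some 0) (some (PySem.Str.len p)) = p ↔ p.toList <+: line.toList := by
  rw [← String.toList_inj]
  simp only [PySem.Str.toList_slice, PySem.Chars.slice_eq_listSlice, PySem.Str.len_eq,
    PySem.List.slice_zero_start, PySem.List.slice_to_natCast, String.length_toList]
  rw [List.prefix_iff_eq_take, ← String.length_toList]
  exact eq_comm

theorem pv_hasPrefix_iff (t q : String) :
    hasPrefixSlice t q = true ↔ q.toList <+: t.toList := by
  unfold hasPrefixSlice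
  have hq : PySem.Str.slice q (some 0) (some (PySem.Str.len q)) = q := by
    rw [← String.toList_inj]
    simp only [PySem.Str.toList_slice, PySem.Chars.slice_eq_listSlice, PySem.Str.len_eq,
      PySem.List.slice_zero_start, PySem.List.slice_to_natCast, List.take_length]
  rw [hq]
  split_ifs with hc
  · simp only [true_iff]
    exact (pv_cond_iff t q).mp hc
  · simp only [false_iff]
    intro hpre
    exact hc ((pv_cond_iff t q).mpr hpre)

theorem pv_prefix_snoc {α : Type} (p l : List α) (c : α) :
    p ++ [c] <+: l ↔ p <+: l ∧ l[p.length]? = some c := by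
  constructor
  · intro h
    obtain ⟨t, ht⟩ := h
    rw [List.append_assoc] at ht
    refine ⟨⟨[c] ++ t, ht⟩, ?_⟩
    rw [← ht]
    rw [List.getElem?_append_right (le_refl _)]
    simp
  · rintro ⟨⟨t, rfl⟩, hget⟩
    rw [List.getElem?_append_right (le_refl _)] at hget
    simp only [Nat.sub_self] at hget
    cases t with
    | nil => simp at hget
    | cons x xs =>
      simp only [List.getElem?_cons_zero, Option.some.injEq] at hget
      subst hget
      exact ⟨xs, by simp⟩

theorem pv_scan_stop (cs : List Char) (j : Nat)
    (h : ∀ (hj : j < cs.length), ¬(cs[j] = '*' ∨ cs[j] = '#')) :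
    listTransAltScan cs j = j := by
  rw [listTransAltScan]
  split_ifs with h1 h2
  · exact absurd h2 (h h1)
  · rfl
  · rfl

theorem pv_scan_step (cs : List Char) (j : Nat) (hj : j < cs.length)
    (hm : cs[j] = '*' ∨ cs[j] = '#') :
    listTransAltScan cs j = listTransAltScan cs (j + 1) := by
  rw [listTransAltScan]
  simp [hj, hm]

theorem pv_scan_noext (line p : String) (h3 : p.toList <+: line.toList)
    (h1 : ¬ (p.toList ++ ['*'] <+: line.toList)) (h2 : ¬ (p.toList ++ ['#'] <+: line.toList)) :
    listTransAltScan line.toList p.toList.length = p.toList.length := by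
  apply pv_scan_stop
  intro hj hc
  rcases hc with hc | hc
  · exact h1 ((pv_prefix_snoc p.toList line.toList '*').mpr
      ⟨h3, List.getElem?_eq_some_iff.mpr ⟨hj, hc⟩⟩)
  · exact h2 ((pv_prefix_snoc p.toList line.toList '#').mpr
      ⟨h3, List.getElem?_eq_some_iff.mpr ⟨hj, hc⟩⟩)

theorem pv_entry_eq (line p : String) (hp : p.toList <+: line.toList) :
    PySem.Str.join "" ((PySem.Str.slice p none (some (-1))).toList.map (fun _ => "    "))
      ++ (if (PySem.Str.pyGet? p (-1)).getD ' ' = '#' then "1.  " else "*   ")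
      ++ PySem.Str.slice line (some (PySem.Str.len p)) none ++ "\n"
      = pvEntry line p.toList.length := by
  have hfull : PySem.Str.slice line none (some ((p.toList.length : Nat) : Int)) = p := by
    rw [← String.toList_inj]
    simp only [PySem.Str.toList_slice, PySem.Chars.slice_eq_listSlice, PySem.List.slice_to_natCast]
    exact ((List.prefix_iff_eq_take.mp hp).symm)
  have hlen2 : (PySem.Str.slice p none (some (-1))).toList.length = p.toList.length - 1 := by
    rw [PySem.Str.slice_to_neg_one]
    exact List.length_dropLast
  have hind : (PySem.Str.slice p none (some (-1))).toList.map (fun _ => ("    " : String))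
      = List.replicate (p.toList.length - 1) "    " := by
    rw [List.map_const', hlen2]
  have hlen : PySem.Str.len p = ((p.toList.length : Nat) : Int) := by simp
  simp only [pvEntry, hfull, hind, hlen]

theorem pv_altSpec_flatten (lines : List String) (p q : String) (m : Char)
    (hm : m = '*' ∨ m = '#') (hq : q.toList = p.toList ++ [m]) :
    ∀ (n : Nat) (c : Int), ((lines.length : Int) - c).toNat ≤ n →
      altSpec lines p c
        = ((altSpec lines q c).1 ++ (altSpec lines p (altSpec lines q c).2).1,
           (altSpec lines p (altSpec lines q c).2).2) := by
  intro n
  induction n with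
  | zero =>
    intro c hc
    have hge : ¬ c < (lines.length : Int) := by omega
    simp [pv_altSpec_stop lines q c hge, pv_altSpec_stop lines p c hge]
  | succ n ih =>
    intro c hc
    by_cases h : c < (lines.length : Int)
    · by_cases hpre : q.toList <+: ((PySem.List.pyGet? lines c).getD "").toList
      · have hsnoc := (pv_prefix_snoc p.toList ((PySem.List.pyGet? lines c).getD "").toList m).mp
          (by rwa [← hq])
        have hpp := hsnoc.1
        obtain ⟨hlt, hval⟩ := List.getElem?_eq_some_iff.mp hsnoc.2
        have hscan : listTransAltScan ((PySem.List.pyGet? lines c).getD "").toList p.toList.length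
            = listTransAltScan ((PySem.List.pyGet? lines c).getD "").toList q.toList.length := by
          rw [pv_scan_step _ p.toList.length hlt (by rw [hval]; exact hm)]
          congr 1
          rw [hq]; simp
        have hcondq : ¬ PySem.Str.slice ((PySem.List.pyGet? lines c).getD "") (some 0) (some (PySem.Str.len q)) ≠ q := by
          simp only [ne_eq, not_not]
          exact (pv_cond_iff _ q).mpr hpre
        have hcondp : ¬ PySem.Str.slice ((PySem.List.pyGet? lines c).getD "") (some 0) (some (PySem.Str.len p)) ≠ p := by
          simp only [ne_eq, not_not]
          exact (pv_cond_iff _ p).mpr hpp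
        rw [pv_altSpec_step lines q c h hcondq, pv_altSpec_step lines p c h hcondp]
        rw [ih (c + 1) (by omega), hscan]
        simp [String.append_assoc]
      · have hcondq : PySem.Str.slice ((PySem.List.pyGet? lines c).getD "") (some 0) (some (PySem.Str.len q)) ≠ q := by
          intro hcc
          exact hpre ((pv_cond_iff _ q).mp hcc)
        simp [pv_altSpec_break lines q c h hcondq]
    · simp [pv_altSpec_stop lines q c h, pv_altSpec_stop lines p c h]

-- equation lemmas for each branch of listTransLoop
theorem pv_loop_base (lines : List String) (flag p : String) (c : Int)
    (h : ¬ c < (lines.length : Int)) : (listTransLoop lines flag p c).1 = ("", c) := by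
  rw [listTransLoop]
  simp only [dif_neg h]

theorem pv_loop_star (lines : List String) (flag p : String) (c : Int)
    (h : c < (lines.length : Int))
    (h1 : hasPrefixSlice ((PySem.List.pyGet? lines c).getD "") (p ++ "*") = true) :
    (listTransLoop lines flag p c).1
      = ((listTransLoop lines "*" (p ++ "*") c).1.1
          ++ (listTransLoop lines flag p (listTransLoop lines "*" (p ++ "*") c).1.2).1.1,
         (listTransLoop lines flag p (listTransLoop lines "*" (p ++ "*") c).1.2).1.2) := by
  rw [listTransLoop]
  simp only [dif_pos h, dif_pos h1]

theorem pv_loop_hash (lines : List String) (flag p : String) (c : Int)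
    (h : c < (lines.length : Int))
    (h1 : ¬ hasPrefixSlice ((PySem.List.pyGet? lines c).getD "") (p ++ "*") = true)
    (h2 : hasPrefixSlice ((PySem.List.pyGet? lines c).getD "") (p ++ "#") = true) :
    (listTransLoop lines flag p c).1
      = ((listTransLoop lines "#" (p ++ "#") c).1.1
          ++ (listTransLoop lines flag p (listTransLoop lines "#" (p ++ "#") c).1.2).1.1,
         (listTransLoop lines flag p (listTransLoop lines "#" (p ++ "#") c).1.2).1.2) := by
  rw [listTransLoop]
  simp only [dif_pos h, dif_neg h1, dif_pos h2]

theorem pv_loop_emit (lines : List String) (flag p : String) (c : Int)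
    (h : c < (lines.length : Int))
    (h1 : ¬ hasPrefixSlice ((PySem.List.pyGet? lines c).getD "") (p ++ "*") = true)
    (h2 : ¬ hasPrefixSlice ((PySem.List.pyGet? lines c).getD "") (p ++ "#") = true)
    (h3 : hasPrefixSlice ((PySem.List.pyGet? lines c).getD "") p = true) :
    (listTransLoop lines flag p c).1
      = (PySem.Str.join "" ((PySem.Str.slice p none (some (-1))).toList.map (fun _ => "    "))
          ++ (if (PySem.Str.pyGet? p (-1)).getD ' ' = '#' then "1.  " else "*   ")
          ++ PySem.Str.slice ((PySem.List.pyGet? lines c).getD "") (some (PySem.Str.len p)) none ++ "\n"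
          ++ (listTransLoop lines flag p (c + 1)).1.1,
         (listTransLoop lines flag p (c + 1)).1.2) := by
  rw [listTransLoop]
  simp only [dif_pos h, dif_neg h1, dif_neg h2, dif_pos h3]

theorem pv_loop_ret (lines : List String) (flag p : String) (c : Int)
    (h : c < (lines.length : Int))
    (h1 : ¬ hasPrefixSlice ((PySem.List.pyGet? lines c).getD "") (p ++ "*") = true)
    (h2 : ¬ hasPrefixSlice ((PySem.List.pyGet? lines c).getD "") (p ++ "#") = true)
    (h3 : ¬ hasPrefixSlice ((PySem.List.pyGet? lines c).getD "") p = true) :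
    (listTransLoop lines flag p c).1 = ("", c) := by
  rw [listTransLoop]
  simp only [dif_pos h, dif_neg h1, dif_neg h2, dif_neg h3]

-- the measure of listTransLoop, for the strong induction of pv_main
def pvMu (lines : List String) (p : String) (c : Int) : Nat :=
  ((lines.length : Int) - c).toNat * (pvMaxLen lines + 2) + (pvMaxLen lines + 1 - p.toList.length)

theorem pv_mu_lt_of_lt (lines : List String) (p : String) {c c' : Int}
    (h : c < (lines.length : Int)) (hc : c < c') : pvMu lines p c' < pvMu lines p c := by
  unfold pvMu
  have hlt : ((lines.length : Int) - c').toNat < ((lines.length : Int) - c).toNat := by omega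
  exact Nat.add_lt_add_right ((Nat.mul_lt_mul_right (by omega)).mpr hlt) _

theorem pv_mu_deeper (lines : List String) (p q : String) (c : Int)
    (hq : q.toList.length = p.toList.length + 1) (hp : p.toList.length ≤ pvMaxLen lines) :
    pvMu lines q c < pvMu lines p c := by
  unfold pvMu
  apply Nat.add_lt_add_left
  omega

theorem pv_main_aux (lines : List String) :
    ∀ (N : Nat) (flag p : String) (c : Int), pvMu lines p c < N →
      (listTransLoop lines flag p c).1 = altSpec lines p c := by
  intro N
  induction N with
  | zero => intro flag p c h; exact absurd h (Nat.not_lt_zero _)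
  | succ N ih =>
    intro flag p c hN
    by_cases h : c < (lines.length : Int)
    · have hmaxline := pvLine_le_maxLen lines c
      by_cases h1 : hasPrefixSlice ((PySem.List.pyGet? lines c).getD "") (p ++ "*") = true
      · have hdeep : pvMu lines (p ++ "*") c < pvMu lines p c := by
          have hq := pvHasPrefix_len _ _ h1
          refine pv_mu_deeper lines p (p ++ "*") c (by simp) ?_
          have : (p ++ "*").toList.length = p.toList.length + 1 := by simp
          omega
        have hgrow := (listTransLoop lines "*" (p ++ "*") c).2.2 ⟨h, h1⟩
        have hih1 := ih "*" (p ++ "*") c (by omega)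
        have hih2 := ih flag p (listTransLoop lines "*" (p ++ "*") c).1.2
          (by have := pv_mu_lt_of_lt lines p h hgrow; omega)
        rw [pv_loop_star lines flag p c h h1, hih2, hih1]
        exact (pv_altSpec_flatten lines p (p ++ "*") '*' (Or.inl rfl) (by simp)
          ((lines.length : Int) - c).toNat c (le_refl _)).symm
      · by_cases h2 : hasPrefixSlice ((PySem.List.pyGet? lines c).getD "") (p ++ "#") = true
        · have hdeep : pvMu lines (p ++ "#") c < pvMu lines p c := by
            have hq := pvHasPrefix_len _ _ h2
            refine pv_mu_deeper lines p (p ++ "#") c (by simp) ?_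
            have : (p ++ "#").toList.length = p.toList.length + 1 := by simp
            omega
          have hgrow := (listTransLoop lines "#" (p ++ "#") c).2.2 ⟨h, h2⟩
          have hih1 := ih "#" (p ++ "#") c (by omega)
          have hih2 := ih flag p (listTransLoop lines "#" (p ++ "#") c).1.2
            (by have := pv_mu_lt_of_lt lines p h hgrow; omega)
          rw [pv_loop_hash lines flag p c h h1 h2, hih2, hih1]
          exact (pv_altSpec_flatten lines p (p ++ "#") '#' (Or.inr rfl) (by simp)
            ((lines.length : Int) - c).toNat c (le_refl _)).symm
        · by_cases h3 : hasPrefixSlice ((PySem.List.pyGet? lines c).getD "") p = true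
          · have hpp := (pv_hasPrefix_iff _ p).mp h3
            have hstar : ¬ (p.toList ++ ['*'] <+: ((PySem.List.pyGet? lines c).getD "").toList) := by
              intro hcc
              exact h1 ((pv_hasPrefix_iff _ (p ++ "*")).mpr (by simpa using hcc))
            have hhash : ¬ (p.toList ++ ['#'] <+: ((PySem.List.pyGet? lines c).getD "").toList) := by
              intro hcc
              exact h2 ((pv_hasPrefix_iff _ (p ++ "#")).mpr (by simpa using hcc))
            have hcondp : ¬ PySem.Str.slice ((PySem.List.pyGet? lines c).getD "") (some 0) (some (PySem.Str.len p)) ≠ p := by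
              simp only [ne_eq, not_not]
              exact (pv_cond_iff _ p).mpr hpp
            have hih := ih flag p (c + 1) (by have := pv_mu_lt_of_lt lines p h (by omega : c < c + 1); omega)
            rw [pv_loop_emit lines flag p c h h1 h2 h3, hih,
              pv_altSpec_step lines p c h hcondp,
              pv_scan_noext _ p hpp hstar hhash,
              ← pv_entry_eq _ p hpp]
          · have hcondp : PySem.Str.slice ((PySem.List.pyGet? lines c).getD "") (some 0) (some (PySem.Str.len p)) ≠ p := by
              intro hcc
              exact h3 ((pv_hasPrefix_iff _ p).mpr ((pv_cond_iff _ p).mp hcc))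
            rw [pv_loop_ret lines flag p c h h1 h2 h3, pv_altSpec_break lines p c h hcondp]
    · rw [pv_loop_base lines flag p c h, pv_altSpec_stop lines p c h]

theorem pv_main (lines : List String) (flag p : String) (c : Int) :
    (listTransLoop lines flag p c).1 = altSpec lines p c :=
  pv_main_aux lines (pvMu lines p c + 1) flag p c (Nat.lt_succ_self _)

-- ===== VERDICT (by name: the statement is the Claim_ definition above) =====
theorem list_trans_spec : Claim_equal_list_trans := by
  intro lines curline flag prefix_ _ _
  unfold Spec_list_trans list_trans list_trans_alt
  have hwrap : (PySem.Str.join "" (listTransAltLoop lines prefix_ [] curline).1,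
      (listTransAltLoop lines prefix_ [] curline).2) = altSpec lines prefix_ curline := by
    rw [pv_altLoop_spec lines prefix_ [] curline]
    refine Prod.ext ?_ rfl
    show PySem.Str.join "" [] ++ _ = _
    rw [show PySem.Str.join "" ([] : List String) = "" from rfl, pv_empty_append]
  have hmain : (listTransLoop lines flag prefix_ curline).1
      = (PySem.Str.join "" (listTransAltLoop lines prefix_ [] curline).1,
         (listTransAltLoop lines prefix_ [] curline).2) := by
    rw [pv_main lines flag prefix_ curline, hwrap]
  simp only [ite_self]
  show ("" ++ (listTransLoop lines flag prefix_ curline).1.1 ++ "",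
      (listTransLoop lines flag prefix_ curline).1.2) = _
  rw [pv_empty_append, pv_append_empty, Prod.mk.eta]
  exact hmain
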